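-- pv_equiv track=rewrite | github.com/Amer-Jabar/machine-learning-visualization | helpers/LogisticRegressionHelper.py | fill_with_values
-- ===== SOURCE A (Python) =====
-- def fill_with_values(size, value_1, value_2):
--     array = []
--     for x in range(size):
--         if x < size / 2:
--             array.append(value_1)
--         else:
--             array.append(value_2)
--     return array
-- ===== SOURCE B (Python) =====
-- def fill_with_values(size, value_1, value_2):
--     k = (size + 1) // 2  # number of x in range(size) with x < size/2
--     return [value_1] * k + [value_2] * (size - k)
-- ===== Notes on version B (the rewrite author's own statement) =====
-- stated objective: idiomatic
-- what changed: Computes the split point k=(size+1)//2 once and returns two replicated blocks instead of looping over every index with a float comparison per element.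
import Mathlib
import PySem

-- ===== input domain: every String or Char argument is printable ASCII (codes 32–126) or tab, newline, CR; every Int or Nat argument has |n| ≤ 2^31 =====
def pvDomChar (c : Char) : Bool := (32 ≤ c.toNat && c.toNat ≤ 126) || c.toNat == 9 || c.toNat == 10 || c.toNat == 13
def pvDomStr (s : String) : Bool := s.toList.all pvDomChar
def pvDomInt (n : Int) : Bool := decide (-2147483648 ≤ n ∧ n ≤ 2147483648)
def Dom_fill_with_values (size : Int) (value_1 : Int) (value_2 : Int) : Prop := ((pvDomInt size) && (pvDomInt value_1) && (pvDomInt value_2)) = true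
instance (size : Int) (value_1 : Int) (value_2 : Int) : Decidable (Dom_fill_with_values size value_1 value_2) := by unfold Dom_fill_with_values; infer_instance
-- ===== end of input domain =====

-- ===== PORT A =====
-- A's loop: append value_1 while x < size/2, else value_2. The Python test 'x < size / 2'
-- is a float comparison; for |size| ≤ 2^31 it is exact and equals 2*x < size.
def fill_with_values (size : Int) (value_1 : Int) (value_2 : Int) : List Int :=
  (PySem.List.pyRange 0 size 1).foldl
    (fun array x => if 2 * x < size then array ++ [value_1] else array ++ [value_2]) []

-- ===== PORT B =====
-- B: k = (size+1)//2, then [value_1]*k + [value_2]*(size-k)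
def fill_with_values_alt (size : Int) (value_1 : Int) (value_2 : Int) : List Int :=
  let k := PySem.Int.floordiv (size + 1) 2
  PySem.List.pyRepeat [value_1] k ++ PySem.List.pyRepeat [value_2] (size - k)

-- ===== PRECONDITION & SPEC =====
def Spec_fill_with_values (size : Int) (value_1 : Int) (value_2 : Int) (out : List Int) : Prop := out = fill_with_values_alt size value_1 value_2
instance (size : Int) (value_1 : Int) (value_2 : Int) (out : List Int) : Decidable (Spec_fill_with_values size value_1 value_2 out) := by unfold Spec_fill_with_values; infer_instance

-- ===== CLAIM (what is proved, stated in full; the proofs are below) =====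
def Claim_equal_fill_with_values : Prop := ∀ (size : Int) (value_1 : Int) (value_2 : Int), Dom_fill_with_values size value_1 value_2 → Spec_fill_with_values size value_1 value_2 (fill_with_values size value_1 value_2)

-- ===== LEMMAS AND PROOFS =====

-- ===== VERDICT (by name: the statement is the Claim_ definition above) =====
theorem fill_with_values_spec : Claim_equal_fill_with_values := by
  intro size v1 v2 _
  unfold Spec_fill_with_values fill_with_values fill_with_values_alt
  have hk : PySem.Int.floordiv (size + 1) 2 * 2 ≤ size + 1 ∧
      size + 1 < (PySem.Int.floordiv (size + 1) 2 + 1) * 2 :=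
    (PySem.Int.floordiv_eq_iff_of_pos (by omega)).mp rfl
  set k := PySem.Int.floordiv (size + 1) 2 with hkdef
  simp only [PySem.List.pyRepeat_singleton]
  have hstep : (fun (array : List Int) (x : Int) =>
      if 2 * x < size then array ++ [v1] else array ++ [v2]) =
      fun array x => array ++ [if 2 * x < size then v1 else v2] := by
    funext a x; by_cases h : 2 * x < size <;> simp [h]
  rw [hstep, PySem.List.foldl_append_singleton_eq_map, List.nil_append]
  by_cases hs : size ≤ 0
  · rw [PySem.List.pyRange_one_eq_nil hs]
    have h1 : k.toNat = 0 := by omega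
    have h2 : (size - k).toNat = 0 := by omega
    simp [h1, h2]
  · have hk0 : 0 ≤ k := by omega
    have hks : k ≤ size := by omega
    rw [PySem.List.pyRange_one_append 0 k size hk0 hks, List.map_append]
    congr 1
    · rw [List.map_congr_left (g := fun _ => v1)
        (fun x hx => by
          have := (PySem.List.mem_pyRange_one).mp hx
          simp only [if_pos (by omega : 2 * x < size)]),
        List.map_const', PySem.List.length_pyRange_one]
      congr 1; omega
    · rw [List.map_congr_left (g := fun _ => v2)
        (fun x hx => by
          have := (PySem.List.mem_pyRange_one).mp hx
          simp only [if_neg (by omega : ¬ 2 * x < size)]),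
        List.map_const', PySem.List.length_pyRange_one]
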